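-- pv_equiv track=rewrite | github.com/mzookim05/t1-3 | scripts/aihub/problem_generation/production_batches/run_descriptive_production_wave.py | cap_source_quota
-- ===== SOURCE A (Python) =====
-- def cap_source_quota(counts: dict[str, int], source_subset: str, cap: int, destination_sources: list[str]) -> dict[str, int]:
--     # source-local availability가 1건만 부족해도 대형 route 전체가 막히므로,
--     # depleted 직전 source는 cap을 걸고 같은 해석례 계열 source로 초과 quota를 옮긴다.
--     current_count = counts.get(source_subset, 0)
--     excess_count = max(0, current_count - cap)
--     counts[source_subset] = min(current_count, cap)
--     if not destination_sources:
--         return counts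
--     for index in range(excess_count):
--         counts[destination_sources[index % len(destination_sources)]] = counts.get(
--             destination_sources[index % len(destination_sources)],
--             0,
--         ) + 1
--     return counts
-- ===== SOURCE B (Python) =====
-- def cap_source_quota(counts: dict[str, int], source_subset: str, cap: int, destination_sources: list[str]) -> dict[str, int]:
--     current = counts.get(source_subset, 0)
--     counts[source_subset] = min(current, cap)
--     # Peel one destination at a time: the head takes the ceiling of an even split
--     # over the destinations not yet served, which is exactly its round-robin total.
--     remaining = max(0, current - cap)
--     slots = len(destination_sources)
--     for head in destination_sources:
--         take = -(-remaining // slots)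
--         if take:
--             counts[head] = counts.get(head, 0) + take
--         remaining -= take
--         slots -= 1
--     return counts
-- ===== Notes on version B (the rewrite author's own statement) =====
-- stated objective: alternative
-- what changed: Replaces the per-unit round-robin loop (one dict increment per excess unit, index % n) with a single peel pass over the destinations in which each destination takes the ceiling of an even split of the remaining excess over the destinations not yet served; B's cost is O(n) independent of the excess, but a timing run could not confirm a measured speedup on its inputs.
import Mathlib
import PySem

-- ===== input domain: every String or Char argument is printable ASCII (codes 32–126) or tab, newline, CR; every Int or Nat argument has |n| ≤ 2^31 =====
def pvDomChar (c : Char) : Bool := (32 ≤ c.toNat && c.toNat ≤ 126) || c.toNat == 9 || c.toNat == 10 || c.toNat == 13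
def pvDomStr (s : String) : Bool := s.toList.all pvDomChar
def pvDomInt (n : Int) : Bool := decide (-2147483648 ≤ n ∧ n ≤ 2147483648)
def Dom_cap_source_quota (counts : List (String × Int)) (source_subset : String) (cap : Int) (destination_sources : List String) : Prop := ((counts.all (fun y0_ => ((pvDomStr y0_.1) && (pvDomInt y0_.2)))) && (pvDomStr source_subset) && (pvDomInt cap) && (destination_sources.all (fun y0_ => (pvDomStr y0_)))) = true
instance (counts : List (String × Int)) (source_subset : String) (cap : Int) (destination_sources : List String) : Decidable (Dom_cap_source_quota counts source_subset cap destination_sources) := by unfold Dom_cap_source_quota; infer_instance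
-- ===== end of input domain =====

-- B replaces A's per-unit round-robin loop (one dict increment per excess unit) by one pass over
-- the destinations, each taking the ceiling of an even split of what remains over the unserved ones.
-- Python A mutates `counts` in place; the equivalence proved here is about the returned dict
-- (in Python the returned object IS the mutated argument, and B performs the same mutation).

-- ===== PORT A =====
def cap_source_quota (counts : List (String × Int)) (source_subset : String) (cap : Int) (destination_sources : List String) : List (String × Int) :=
  let d0 : PySem.Dict String Int := PySem.Dict.mk counts
  let current_count := d0.getD source_subset 0
  let excess_count := max 0 (current_count - cap)
  let d1 := d0.insert source_subset (min current_count cap)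
  if destination_sources.isEmpty then d1.items
  else
    ((PySem.List.pyRange 0 excess_count 1).foldl (fun c index =>
      -- counts[dests[index % len(dests)]] = counts.get(dests[index % len(dests)], 0) + 1;
      -- the index is always in range, so the `none` (IndexError) arm is unreachable
      match PySem.List.pyGet? destination_sources (PySem.Int.mod index (destination_sources.length : Int)) with
      | some dest => c.insert dest (c.getD dest 0 + 1)
      | none => c) d1).items

-- ===== PORT B =====
-- the for-loop of Source B: each step the head of the not-yet-served suffix (whose length is
-- Source B's running `slots`) takes ceil(remaining / slots) = -((-remaining) // slots)
def pvSpread : PySem.Dict String Int → List String → Int → PySem.Dict String Int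
  | c, [], _ => c
  | c, head :: tail, remaining =>
    let take := -(PySem.Int.floordiv (-remaining) ((head :: tail).length : Int))
    pvSpread (if take ≠ 0 then c.insert head (c.getD head 0 + take) else c) tail (remaining - take)

def cap_source_quota_alt (counts : List (String × Int)) (source_subset : String) (cap : Int) (destination_sources : List String) : List (String × Int) :=
  let c : PySem.Dict String Int := PySem.Dict.mk counts
  let current := c.getD source_subset 0
  (pvSpread (c.insert source_subset (min current cap)) destination_sources (max 0 (current - cap))).items

-- ===== PRECONDITION & SPEC =====
def Spec_cap_source_quota (counts : List (String × Int)) (source_subset : String) (cap : Int) (destination_sources : List String) (out : List (String × Int)) : Prop := out = cap_source_quota_alt counts source_subset cap destination_sources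
instance (counts : List (String × Int)) (source_subset : String) (cap : Int) (destination_sources : List String) (out : List (String × Int)) : Decidable (Spec_cap_source_quota counts source_subset cap destination_sources out) := by unfold Spec_cap_source_quota; infer_instance

-- ===== CLAIM (what is proved, stated in full; the proofs are below) =====
def Claim_equal_cap_source_quota : Prop := ∀ (counts : List (String × Int)) (source_subset : String) (cap : Int) (destination_sources : List String), Dom_cap_source_quota counts source_subset cap destination_sources → Spec_cap_source_quota counts source_subset cap destination_sources (cap_source_quota counts source_subset cap destination_sources)

-- ===== LEMMAS AND PROOFS =====

-- `bump c d a` = `c[d] = c.get(d, 0) + a`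
def pvBump (c : PySem.Dict String Int) (d : String) (a : Int) : PySem.Dict String Int :=
  c.insert d (c.getD d 0 + a)

-- the abstract one-pass distributor, amounts given by f on the position index
def pvPass (f : Nat → Int) : Nat → PySem.Dict String Int → List String → PySem.Dict String Int
  | _, c, [] => c
  | k, c, x :: xs => pvPass f (k+1) (if f k ≠ 0 then pvBump c x (f k) else c) xs

theorem pvBump_bump_self (c : PySem.Dict String Int) (d : String) (a b : Int) :
    pvBump (pvBump c d a) d b = pvBump c d (a + b) := by
  unfold pvBump
  rw [PySem.Dict.getD_insert_self, PySem.Dict.insert_insert_self]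
  ring_nf

theorem pvInsert_insert_comm (c : PySem.Dict String Int) (d d' : String) (v w : Int)
    (h : c.contains d = true) (hne : d' ≠ d) :
    (c.insert d v).insert d' w = (c.insert d' w).insert d v := by
  apply PySem.Dict.ext
  have hd'd : (d' == d) = false := by simpa using hne
  have hdd' : (d == d') = false := by simp; exact fun e => hne e.symm
  have h1 : (c.insert d v).contains d' = c.contains d' := by
    rw [PySem.Dict.contains_insert]; simp [hd'd]
  have h2 : (c.insert d' w).contains d = true := by
    rw [PySem.Dict.contains_insert]; simp [h]
  by_cases hc' : c.contains d' = true
  · rw [PySem.Dict.items_insert_of_contains _ w (h1 ▸ hc'),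
        PySem.Dict.items_insert_of_contains _ v h,
        PySem.Dict.items_insert_of_contains _ v h2,
        PySem.Dict.items_insert_of_contains _ w hc',
        List.map_map, List.map_map]
    apply List.map_congr_left
    intro p _
    simp only [Function.comp]
    by_cases hp : (p.1 == d) = true
    · have : p.1 = d := by simpa using hp
      simp [this, hdd']
    · by_cases hp' : (p.1 == d') = true
      · have : p.1 = d' := by simpa using hp'
        simp [this, hd'd]
      · simp [hp, hp']
  · have hcf : c.contains d' = false := by simpa using hc'
    rw [PySem.Dict.items_insert_of_not_contains _ w (h1 ▸ hcf),
        PySem.Dict.items_insert_of_contains _ v h,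
        PySem.Dict.items_insert_of_contains _ v h2,
        PySem.Dict.items_insert_of_not_contains _ w hcf,
        List.map_append]
    simp
    exact fun e => absurd e hne

theorem pvBump_comm (c : PySem.Dict String Int) (d d' : String) (a b : Int)
    (h : c.contains d = true) (hne : d' ≠ d) :
    pvBump (pvBump c d a) d' b = pvBump (pvBump c d' b) d a := by
  unfold pvBump
  rw [PySem.Dict.getD_insert_of_ne _ _ _ hne,
      PySem.Dict.getD_insert_of_ne _ _ _ (fun e => hne e.symm),
      pvInsert_insert_comm c d d' _ _ h hne]

theorem pvPass_zero (f : Nat → Int) (k : Nat) (c : PySem.Dict String Int) (xs : List String)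
    (hz : ∀ j, k ≤ j → j < k + xs.length → f j = 0) :
    pvPass f k c xs = c := by
  induction xs generalizing k c with
  | nil => rfl
  | cons x xs ih =>
    simp only [pvPass]
    rw [if_neg (by simp [hz k (le_refl k) (by simp)]),
        ih (k+1) c (fun j h1 h2 => hz j (by omega) (by simp at h2 ⊢; omega))]

theorem pvPass_bump (f : Nat → Int) (k : Nat) (c : PySem.Dict String Int) (xs : List String)
    (d : String) (h : c.contains d = true) :
    pvPass f k (pvBump c d 1) xs = pvBump (pvPass f k c xs) d 1 := by
  induction xs generalizing k c with
  | nil => rfl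
  | cons x xs ih =>
    simp only [pvPass]
    by_cases hfk : f k ≠ 0
    · rw [if_pos hfk, if_pos hfk]
      by_cases hxd : x = d
      · subst hxd
        rw [pvBump_bump_self, Int.add_comm, ← pvBump_bump_self]
        exact ih (k+1) (pvBump c x (f k)) (by unfold pvBump; exact PySem.Dict.contains_insert_self _ _ _)
      · rw [pvBump_comm c d x 1 (f k) h hxd]
        refine ih (k+1) (pvBump c x (f k)) ?_
        unfold pvBump
        rw [PySem.Dict.contains_insert]
        simp [h]
    · rw [if_neg hfk, if_neg hfk]
      exact ih (k+1) c h

theorem pvPass_congr (f f' : Nat → Int) (k : Nat) (c : PySem.Dict String Int) (xs : List String)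
    (h : ∀ j, k ≤ j → j < k + xs.length → f' j = f j) :
    pvPass f' k c xs = pvPass f k c xs := by
  induction xs generalizing k c with
  | nil => rfl
  | cons x xs ih =>
    simp only [pvPass]
    rw [h k (le_refl k) (by simp), ih (k+1) _ (fun j h1 h2 => h j (by omega) (by simpa [Nat.add_comm, Nat.add_left_comm] using (by simp at h2 ⊢; omega : j < k + (x :: xs).length)))]

-- key step: raising the amount at one position r by 1 = doing the pass, then one extra bump at xs[r-k]
theorem pvPass_step (f f' : Nat → Int) (k r : Nat) (c : PySem.Dict String Int) (xs : List String)
    (d : String)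
    (hkr : k ≤ r) (hr : r < k + xs.length) (hd : xs[r - k]? = some d)
    (hfr : f' r = f r + 1)
    (hfe : ∀ j, k ≤ j → j < k + xs.length → j ≠ r → f' j = f j)
    (hnn : ∀ j, 0 ≤ f j)
    (hz : f r = 0 → ∀ j, r < j → j < k + xs.length → f' j = 0) :
    pvPass f' k c xs = pvBump (pvPass f k c xs) d 1 := by
  induction xs generalizing k c with
  | nil => simp at hr; omega
  | cons x xs ih =>
    by_cases hkr' : k = r
    · subst hkr'
      have hx : x = d := by
        simpa [Nat.sub_self] using hd
      subst hx
      by_cases hfk : f k = 0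
      · simp only [pvPass]
        rw [if_pos (by rw [hfr, hfk]; norm_num), if_neg (by simp [hfk])]
        rw [pvPass_zero f' (k+1) _ xs
            (fun j h1 h2 => hz hfk j (by omega) (by simp at h2 ⊢; omega))]
        rw [pvPass_zero f (k+1) c xs (fun j h1 h2 => ?_)]
        · rw [hfr, hfk]; norm_num
        · have hj : j ≠ k := by omega
          rw [← hfe j (by omega) (by simp at h2 ⊢; omega) hj]
          exact hz hfk j (by omega) (by simp at h2 ⊢; omega)
      · have hf1 : 1 ≤ f k := by have := hnn k; omega
        simp only [pvPass]
        rw [if_pos (by rw [hfr]; omega), if_pos hfk, hfr]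
        rw [show pvBump c x (f k + 1) = pvBump (pvBump c x (f k)) x 1 from
              by rw [pvBump_bump_self]]
        rw [pvPass_congr f f' (k+1) _ xs
            (fun j h1 h2 => hfe j (by omega) (by simp at h2 ⊢; omega) (by omega))]
        exact pvPass_bump f (k+1) _ xs x
          (by unfold pvBump; exact PySem.Dict.contains_insert_self _ _ _)
    · have hklt : k < r := lt_of_le_of_ne hkr hkr'
      simp only [pvPass]
      rw [hfe k (le_refl k) (by simp) (by omega)]
      refine ih (k+1) _ (by omega) (by simp at hr ⊢; omega) ?_
        (fun j h1 h2 hj => hfe j (by omega) (by simp at h2 ⊢; omega) hj)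
        (fun h0 j h1 h2 => hz h0 j h1 (by simp at h2 ⊢; omega))
      have : r - k = (r - (k+1)) + 1 := by omega
      rw [this] at hd
      simpa using hd

-- the round-robin totals: position j of n destinations receives e/n + (1 if j < e%n)
def pvFe (n e j : Nat) : Int := ((e / n : Nat) : Int) + (if j < e % n then 1 else 0)

-- A's round-robin fold over range(e) equals the abstract pass with those totals
theorem pvMain (ds : List String) (hds : ds ≠ []) (e : Nat) (c : PySem.Dict String Int) :
    ((PySem.List.pyRange 0 (e : Int) 1).foldl (fun c index =>
      match PySem.List.pyGet? ds (PySem.Int.mod index (ds.length : Int)) with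
      | some dest => c.insert dest (c.getD dest 0 + 1)
      | none => c) c)
    = pvPass (pvFe ds.length e) 0 c ds := by
  have hn : 0 < ds.length := List.length_pos_iff.mpr hds
  induction e with
  | zero =>
    rw [show ((0 : Nat) : Int) = 0 from rfl, PySem.List.pyRange_one_eq_nil (le_refl 0)]
    rw [pvPass_zero _ 0 c ds (fun j _ _ => by simp [pvFe])]
    rfl
  | succ e ih =>
    have hcast : ((e + 1 : Nat) : Int) = (e : Int) + 1 := by push_cast; ring
    rw [hcast, PySem.List.pyRange_one_succ_right (by positivity), List.foldl_append,
        List.foldl_cons, List.foldl_nil, ih]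
    have hmod : PySem.Int.mod (e : Int) (ds.length : Int) = ((e % ds.length : Nat) : Int) :=
      PySem.Int.mod_natCast e ds.length
    have hidx : e % ds.length < ds.length := Nat.mod_lt _ hn
    rw [hmod, PySem.List.pyGet?_natCast, List.getElem?_eq_getElem hidx]
    have h1 : ds.length * (e / ds.length) + e % ds.length = e := Nat.div_add_mod e ds.length
    have h2 : ds.length * ((e + 1) / ds.length) + (e + 1) % ds.length = e + 1 :=
      Nat.div_add_mod (e + 1) ds.length
    have hsd : (e + 1) / ds.length = e / ds.length + if ds.length ∣ e + 1 then 1 else 0 :=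
      Nat.succ_div
    have hem : e % ds.length < ds.length := Nat.mod_lt _ hn
    have hem1 : (e + 1) % ds.length < ds.length := Nat.mod_lt _ hn
    by_cases hdvd : ds.length ∣ e + 1
    · have h3 : (e + 1) / ds.length = e / ds.length + 1 := by rw [hsd, if_pos hdvd]
      have h4 : ds.length * ((e + 1) / ds.length) = ds.length * (e / ds.length) + ds.length := by
        rw [h3, Nat.mul_add, Nat.mul_one]
      have hm0 : (e + 1) % ds.length = 0 := Nat.mod_eq_zero_of_dvd hdvd
      have hr : e % ds.length = ds.length - 1 := by omega
      refine (pvPass_step (pvFe ds.length e) (pvFe ds.length (e+1)) 0 (e % ds.length) c ds _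
        (Nat.zero_le _) (by omega) (by rw [Nat.sub_zero, List.getElem?_eq_getElem hidx])
        ?_ ?_ ?_ ?_).symm
      · simp only [pvFe, h3, hm0, hr]
        push_cast
        split_ifs <;> omega
      · intro j _ hj hjr
        simp only [pvFe, h3, hm0, hr]
        push_cast
        split_ifs <;> omega
      · intro j
        simp only [pvFe]
        split_ifs <;> positivity
      · intro h0 j hj1 hj2
        exfalso
        rw [hr] at hj1
        omega
    · have h3 : (e + 1) / ds.length = e / ds.length := by rw [hsd, if_neg hdvd]; omega
      have h4 : ds.length * ((e + 1) / ds.length) = ds.length * (e / ds.length) := by rw [h3]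
      have hm1 : (e + 1) % ds.length = e % ds.length + 1 := by omega
      refine (pvPass_step (pvFe ds.length e) (pvFe ds.length (e+1)) 0 (e % ds.length) c ds _
        (Nat.zero_le _) (by omega) (by rw [Nat.sub_zero, List.getElem?_eq_getElem hidx])
        ?_ ?_ ?_ ?_).symm
      · simp only [pvFe, h3, hm1]
        push_cast
        split_ifs <;> omega
      · intro j _ hj hjr
        simp only [pvFe, h3, hm1]
        push_cast
        split_ifs <;> omega
      · intro j
        simp only [pvFe]
        split_ifs <;> positivity
      · intro h0 j hj1 hj2
        have hq : e / ds.length = 0 := by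
          simp only [pvFe] at h0
          rw [if_neg (by omega)] at h0
          push_cast at h0
          omega
        simp only [pvFe, h3, hm1, hq]
        rw [if_neg (by omega)]
        norm_num

-- shifting the start index of the pass
theorem pvPass_succ (f : Nat → Int) (k : Nat) (c : PySem.Dict String Int) (xs : List String) :
    pvPass f (k+1) c xs = pvPass (fun j => f (j+1)) k c xs := by
  induction xs generalizing k c with
  | nil => rfl
  | cons x xs ih =>
    simp only [pvPass]
    exact ih (k+1) _

-- ceiling division of Nats through Python's floordiv
theorem pvCeil (e n : Nat) (hn : 0 < n) :
    -(PySem.Int.floordiv (-(e : Int)) (n : Int)) = ((e / n + if e % n ≠ 0 then 1 else 0 : Nat) : Int) := by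
  rw [PySem.Int.neg_floordiv_neg_eq_iff_of_pos (by exact_mod_cast hn : (0:Int) < (n:Int))]
  have h1 : n * (e / n) + e % n = e := Nat.div_add_mod e n
  have hq : (e:Int) = (n:Int) * ((e/n : Nat):Int) + ((e%n : Nat):Int) := by exact_mod_cast h1.symm
  have h2' : ((e%n:Nat):Int) < (n:Int) := by exact_mod_cast Nat.mod_lt e hn
  have hn' : (0:Int) < (n:Int) := by exact_mod_cast hn
  by_cases h : e % n = 0
  · have hz : ((e%n:Nat):Int) = 0 := by exact_mod_cast h
    simp only [h, ne_eq, not_true_eq_false, if_false, Nat.add_zero]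
    constructor <;> nlinarith
  · have hz : (1:Int) ≤ ((e%n:Nat):Int) := by
      exact_mod_cast Nat.one_le_iff_ne_zero.mpr h
    simp only [h, ne_eq, not_false_eq_true, if_true]
    rw [Nat.cast_add, Nat.cast_one]
    constructor <;> nlinarith

-- B's peel pass equals the abstract pass with the round-robin totals
theorem pvSpread_eq (ds : List String) (e : Nat) (c : PySem.Dict String Int) :
    pvSpread c ds (e : Int) = pvPass (pvFe ds.length e) 0 c ds := by
  induction ds generalizing e c with
  | nil => rfl
  | cons x xs ih =>
    have hn : 0 < (x :: xs).length := by simp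
    simp only [pvSpread, pvPass]
    set n := (x :: xs).length with hnn
    set t : Nat := e / n + if e % n ≠ 0 then 1 else 0 with ht
    have htake : -(PySem.Int.floordiv (-(e : Int)) (n : Int)) = (t : Int) := pvCeil e n hn
    have hfe0 : pvFe n e 0 = (t : Int) := by
      simp only [pvFe, ht]
      by_cases h : e % n = 0
      · simp [h]
      · have : 0 < e % n := Nat.pos_of_ne_zero h
        simp only [h, ne_eq, not_false_eq_true, if_true, if_pos this]
        push_cast
        ring
    have hte : t ≤ e := by
      have h1 := Nat.div_add_mod e n
      have h2 := Nat.mod_lt e hn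
      have h3 : e / n ≤ n * (e / n) := Nat.le_mul_of_pos_left (e / n) hn
      simp only [ht]
      split_ifs with hr <;> omega
    have hsub : (e : Int) - (t : Int) = ((e - t : Nat) : Int) := by
      push_cast [hte]; ring
    rw [htake, hfe0, hsub, ih (e - t)]
    rw [pvPass_succ]
    apply pvPass_congr
    intro j _ hj
    simp only [Nat.zero_add] at hj
    -- arithmetic: position j of the tail (n-1 slots, e-t units) = position j+1 of n slots, e units
    have hx : xs.length + 1 = n := by simp [hnn]
    have hm : 0 < xs.length := by omega
    have h1 := Nat.div_add_mod e n
    have h2 := Nat.mod_lt e hn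
    have hprod : n * (e / n) = xs.length * (e / n) + e / n := by
      rw [← hx]; ring
    by_cases hr : e % n = 0
    · have hts : t = e / n := by simp [ht, hr]
      have hdecomp : e - t = xs.length * (e / n) := by omega
      have hdiv : (e - t) / xs.length = e / n := by
        rw [hdecomp, Nat.mul_div_cancel_left _ hm]
      have hmod : (e - t) % xs.length = 0 := by
        rw [hdecomp, Nat.mul_mod_right]
      simp only [pvFe, hdiv, hmod, hr]
      norm_num
    · have hts : t = e / n + 1 := by simp [ht, hr]
      have hdecomp : e - t = xs.length * (e / n) + (e % n - 1) := by omega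
      have hlt : e % n - 1 < xs.length := by omega
      have hdiv : (e - t) / xs.length = e / n := by
        rw [hdecomp, Nat.mul_add_div hm, Nat.div_eq_of_lt hlt, Nat.add_zero]
      have hmod : (e - t) % xs.length = e % n - 1 := by
        rw [hdecomp, Nat.mul_add_mod, Nat.mod_eq_of_lt hlt]
      simp only [pvFe, hdiv, hmod]
      split_ifs <;> first | rfl | omega

theorem pvFinal (counts : List (String × Int)) (source_subset : String) (cap : Int)
    (destination_sources : List String) :
    cap_source_quota counts source_subset cap destination_sources
      = cap_source_quota_alt counts source_subset cap destination_sources := by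
  unfold cap_source_quota cap_source_quota_alt
  dsimp only
  split_ifs with h
  · have : destination_sources = [] := by simpa [List.isEmpty_iff] using h
    rw [this]
    rfl
  · have hne : destination_sources ≠ [] := fun e => by simp [e] at h
    congr 1
    have hE : max 0 ((PySem.Dict.mk counts).getD source_subset 0 - cap)
        = (((max 0 ((PySem.Dict.mk counts).getD source_subset 0 - cap)).toNat : Nat) : Int) :=
      (Int.toNat_of_nonneg (le_max_left _ _)).symm
    rw [hE, pvMain destination_sources hne _ _, pvSpread_eq]

-- ===== VERDICT (by name: the statement is the Claim_ definition above) =====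
theorem cap_source_quota_spec : Claim_equal_cap_source_quota := by
  intro counts source_subset cap destination_sources _
  unfold Spec_cap_source_quota
  exact pvFinal counts source_subset cap destination_sources
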